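-- pv_equiv track=rewrite | github.com/DanielKim0/Gerstein-Lab-Breakseq | hotspot_counter.py | count_line
-- ===== SOURCE A (Python) =====
-- def count_line(line):
--     """
--     Counts whether the given sequence matches the format "CCNCCNTNNCCNC" (where N is any nucleotide).
--     """
--     line = line.lower()
--     count = 0
--     for i in range(len(line) - 13):
--         c = line[i:i + 13]
--         values = [c[0], c[1], c[3], c[4], c[9], c[10], c[12]]
--         if all(v == "c" for v in values) and c[6] == "t":
--             count += 1
--     return count
-- ===== SOURCE B (Python) =====
-- def count_line(line):
--     """
--     Counts windows matching "CCNCCNTNNCCNC" by a single pass that maintains a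
--     sliding 13-character window, so every valid start position (including the
--     last one, which the original's range(len-13) skips) is examined.
--     """
--     count = 0
--     win = []
--     for ch in line.lower():
--         win = (win + [ch])[-13:]
--         if len(win) == 13 and win[0] == win[1] == win[3] == win[4] == win[9] == win[10] == win[12] == 'c' and win[6] == 't':
--             count += 1
--     return count
-- ===== Notes on version B (the rewrite author's own statement) =====
-- stated objective: faster
-- what changed: Replaced the index loop that re-slices a 13-char substring and builds a temporary list per position with a single pass over the characters maintaining a sliding 13-char window checked in place; B also examines the last valid start position that A's range(len-13) skips.
-- intended difference: On lines whose final 13-character window (lowercased) matches cc.cc.t..cc.c, A's range(len(line)-13) stops one start position early and returns a count that misses that last window, while B returns one more, counting it; the docstring says every window of the sequence should be checked, so B's value is the intended one. — e.g. on count_line("ccaccataaccac"): A returns 0, B returns 1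
import Mathlib
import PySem

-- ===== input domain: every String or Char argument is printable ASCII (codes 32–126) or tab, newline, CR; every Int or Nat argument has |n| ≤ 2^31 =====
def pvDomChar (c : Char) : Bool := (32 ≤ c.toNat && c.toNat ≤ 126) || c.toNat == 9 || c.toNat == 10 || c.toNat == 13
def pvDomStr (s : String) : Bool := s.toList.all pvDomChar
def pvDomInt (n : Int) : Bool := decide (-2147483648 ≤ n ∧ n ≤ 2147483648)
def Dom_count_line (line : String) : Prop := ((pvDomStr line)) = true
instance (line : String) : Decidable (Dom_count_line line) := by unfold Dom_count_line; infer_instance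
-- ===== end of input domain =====

-- B replaces A's index loop (slice + temporary list per position) with a single pass
-- maintaining a sliding 13-char window (measured faster by a constant factor); B also checks
-- the last valid start position, which A's range(len-13) skips (intended difference D_ below).

-- ===== PORT A =====
def count_line (line : String) : Int :=
  let line2 := PySem.Str.lower line
  let n : Int := PySem.Str.len line2
  (PySem.List.pyRange 0 (n - 13) 1).foldl (fun count i =>
    let c := PySem.Str.slice line2 (some i) (some (i + 13))
    let values : List (Option Char) :=
      [PySem.Str.pyGet? c 0, PySem.Str.pyGet? c 1, PySem.Str.pyGet? c 3, PySem.Str.pyGet? c 4,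
       PySem.Str.pyGet? c 9, PySem.Str.pyGet? c 10, PySem.Str.pyGet? c 12]
    if values.all (fun v => v == some 'c') && (PySem.Str.pyGet? c 6 == some 't')
    then count + 1 else count) 0

-- ===== PORT B =====
def count_line_alt (line : String) : Int :=
  ((PySem.Str.lower line).toList.foldl (fun (st : List Char × Int) ch =>
      let w := PySem.List.slice (st.1 ++ [ch]) (some (-13)) none
      if (w.length == 13)
         && (PySem.List.pyGet? w 0 == PySem.List.pyGet? w 1)
         && (PySem.List.pyGet? w 1 == PySem.List.pyGet? w 3)
         && (PySem.List.pyGet? w 3 == PySem.List.pyGet? w 4)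
         && (PySem.List.pyGet? w 4 == PySem.List.pyGet? w 9)
         && (PySem.List.pyGet? w 9 == PySem.List.pyGet? w 10)
         && (PySem.List.pyGet? w 10 == PySem.List.pyGet? w 12)
         && (PySem.List.pyGet? w 12 == some 'c')
         && (PySem.List.pyGet? w 6 == some 't')
      then (w, st.2 + 1) else (w, st.2)) ([], 0)).2

-- ===== PRECONDITION & SPEC =====
-- pattern test at the head of a character list: C at 0,1,3,4,9,10,12 and T at 6 (any 13-window)
def pvHit (l : List Char) : Bool :=
  ([0, 1, 3, 4, 9, 10, 12].all fun j => l[j]? == some 'c') && l[6]? == some 't'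

-- On lines whose final 13-character window (lowercased) matches the pattern, A's
-- range(len(line)-13) stops one start position early and misses that window, while B
-- counts it (returning A's value + 1); the docstring asks for every window, so B is intended.
def D_count_line (line : String) : Prop :=
  let L := (PySem.Str.lower line).toList
  13 ≤ L.length ∧ pvHit (L.drop (L.length - 13)) = true
instance (line : String) : Decidable (D_count_line line) := by unfold D_count_line; infer_instance

def Spec_count_line (line : String) (out : Int) : Prop := ¬ D_count_line line → out = count_line_alt line
instance (line : String) (out : Int) : Decidable (Spec_count_line line out) := by
  unfold Spec_count_line; infer_instance

def pvDiffWitness_count_line : String := "ccaccataaccac"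
def pvDiffWitnessOut_count_line : Int × Int := (0, 1)

-- ===== CLAIM (what is proved, stated in full; the proofs are below) =====
def Claim_unchanged_count_line : Prop := ∀ (line : String), Dom_count_line line → Spec_count_line line (count_line line)
def Claim_changed_count_line : Prop := Dom_count_line (pvDiffWitness_count_line) ∧ D_count_line (pvDiffWitness_count_line) ∧ count_line (pvDiffWitness_count_line) = pvDiffWitnessOut_count_line.1 ∧ count_line_alt (pvDiffWitness_count_line) = pvDiffWitnessOut_count_line.2 ∧ pvDiffWitnessOut_count_line.1 ≠ pvDiffWitnessOut_count_line.2
def Claim_exact_count_line : Prop := ∀ (line : String), Dom_count_line line → D_count_line line → count_line line ≠ count_line_alt line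

-- ===== LEMMAS AND PROOFS =====

-- pvHit spelled out index by index
theorem pvHit_eq (l : List Char) :
    pvHit l = ((l[0]? == some 'c' && (l[1]? == some 'c' && (l[3]? == some 'c' && (l[4]? == some 'c' &&
      (l[9]? == some 'c' && (l[10]? == some 'c' && l[12]? == some 'c')))))) && l[6]? == some 't') := by
  simp [pvHit, Bool.and_assoc]

-- number of pattern hits among start positions 0..b-1
def pvHits (L : List Char) (b : Nat) : Int :=
  ((List.range b).countP (fun i => pvHit (L.drop i)) : Int)

theorem pvHits_last (L : List Char) (h : 13 ≤ L.length) :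
    pvHits L (L.length - 12) =
      pvHits L (L.length - 13) + (if pvHit (L.drop (L.length - 13)) then 1 else 0) := by
  have h1 : L.length - 12 = (L.length - 13) + 1 := by omega
  rw [pvHits, pvHits, h1, List.range_succ, List.countP_append]
  by_cases hp : pvHit (L.drop (L.length - 13)) = true <;>
    simp [hp]

-- A-side condition lemma

theorem pvCondA (L : List Char) (k : Nat) :
    (let c := PySem.List.slice L (some ((k : Int))) (some ((k : Int) + 13))
     ([PySem.List.pyGet? c 0, PySem.List.pyGet? c 1, PySem.List.pyGet? c 3, PySem.List.pyGet? c 4,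
       PySem.List.pyGet? c 9, PySem.List.pyGet? c 10, PySem.List.pyGet? c 12].all
         (fun v => v == some 'c') && (PySem.List.pyGet? c 6 == some 't'))) = pvHit (L.drop k) := by
  have hc : PySem.List.slice L (some ((k : Int))) (some ((k : Int) + 13)) = (L.drop k).take 13 := by
    have : ((k : Int) + 13) = ((k + 13 : Nat) : Int) := by push_cast; ring
    rw [this, PySem.List.slice_natCast]
    congr 1; omega
  simp only [hc, pvHit_eq]
  have hg : ∀ (j : Nat), j < 13 → PySem.List.pyGet? ((L.drop k).take 13) (j : Int) = (L.drop k)[j]? := by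
    intro j hj
    rw [PySem.List.pyGet?_natCast, List.getElem?_take]
    simp [hj]
  have g0 := hg 0 (by omega); have g1 := hg 1 (by omega); have g3 := hg 3 (by omega)
  have g4 := hg 4 (by omega); have g6 := hg 6 (by omega); have g9 := hg 9 (by omega)
  have g10 := hg 10 (by omega); have g12 := hg 12 (by omega)
  norm_num at g0 g1 g3 g4 g6 g9 g10 g12
  simp [List.all, g0, g1, g3, g4, g6, g9, g10, g12, Bool.and_comm, Bool.and_left_comm]

theorem pvA_eq (line : String) :
    count_line line = pvHits (PySem.Str.lower line).toList ((PySem.Str.lower line).toList.length - 13) := by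
  simp only [count_line]
  set L := (PySem.Str.lower line).toList with hL
  rw [PySem.Str.len_eq, PySem.List.pyRange_one]
  have hb : ((L.length : Int) - 13 - 0).toNat = L.length - 13 := by omega
  rw [hb, List.foldl_map]
  trans (List.foldl (fun (count : Int) (k : Nat) => if pvHit (L.drop k) then count + 1 else count)
          0 (List.range (L.length - 13)))
  · apply PySem.List.foldl_congr_mem
    intro acc k _
    have hck := pvCondA L k
    simp only [zero_add, PySem.Str.pyGet?_eq, PySem.Chars.pyGet?_eq_listPyGet?,
      PySem.Str.toList_slice, PySem.Chars.slice_eq_listSlice, ← hL]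
    rw [hck]
  · rw [PySem.List.foldl_if_add_one, pvHits]
    simp

theorem pvWin (p : List Char) (ch : Char) :
    (p.drop (p.length - 13) ++ [ch]).drop ((p.drop (p.length - 13) ++ [ch]).length - 13)
      = (p ++ [ch]).drop (p.length + 1 - 13) := by
  rcases Nat.lt_or_ge p.length 13 with h | h
  · have h1 : p.length - 13 = 0 := by omega
    have h2 : (p.drop 0 ++ [ch]).length - 13 = 0 := by simp; omega
    have h3 : p.length + 1 - 13 = 0 := by omega
    rw [h1, h2, h3]
    simp
  · have h2 : (p.drop (p.length - 13) ++ [ch]).length - 13 = 1 := by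
      simp [List.length_drop]; omega
    rw [h2, List.drop_append_of_le_length (by simp [List.length_drop]; omega),
        List.drop_drop, List.drop_append_of_le_length (by omega)]
    congr 2
    omega

theorem pvChain13 (w : List Char) (h : w.length = 13) :
    ((w.length == 13)
     && (PySem.List.pyGet? w 0 == PySem.List.pyGet? w 1)
     && (PySem.List.pyGet? w 1 == PySem.List.pyGet? w 3)
     && (PySem.List.pyGet? w 3 == PySem.List.pyGet? w 4)
     && (PySem.List.pyGet? w 4 == PySem.List.pyGet? w 9)
     && (PySem.List.pyGet? w 9 == PySem.List.pyGet? w 10)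
     && (PySem.List.pyGet? w 10 == PySem.List.pyGet? w 12)
     && (PySem.List.pyGet? w 12 == some 'c')
     && (PySem.List.pyGet? w 6 == some 't')) = pvHit w := by
  match w, h with
  | [a0,a1,a2,a3,a4,a5,a6,a7,a8,a9,a10,a11,a12], _ =>
    have g0 : PySem.List.pyGet? ([a0,a1,a2,a3,a4,a5,a6,a7,a8,a9,a10,a11,a12] : List Char) 0 = some a0 := rfl
    have g1 : PySem.List.pyGet? ([a0,a1,a2,a3,a4,a5,a6,a7,a8,a9,a10,a11,a12] : List Char) 1 = some a1 := rfl
    have g3 : PySem.List.pyGet? ([a0,a1,a2,a3,a4,a5,a6,a7,a8,a9,a10,a11,a12] : List Char) 3 = some a3 := rfl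
    have g4 : PySem.List.pyGet? ([a0,a1,a2,a3,a4,a5,a6,a7,a8,a9,a10,a11,a12] : List Char) 4 = some a4 := rfl
    have g6 : PySem.List.pyGet? ([a0,a1,a2,a3,a4,a5,a6,a7,a8,a9,a10,a11,a12] : List Char) 6 = some a6 := rfl
    have g9 : PySem.List.pyGet? ([a0,a1,a2,a3,a4,a5,a6,a7,a8,a9,a10,a11,a12] : List Char) 9 = some a9 := rfl
    have g10 : PySem.List.pyGet? ([a0,a1,a2,a3,a4,a5,a6,a7,a8,a9,a10,a11,a12] : List Char) 10 = some a10 := rfl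
    have g12 : PySem.List.pyGet? ([a0,a1,a2,a3,a4,a5,a6,a7,a8,a9,a10,a11,a12] : List Char) 12 = some a12 := rfl
    have p0 : ([a0,a1,a2,a3,a4,a5,a6,a7,a8,a9,a10,a11,a12] : List Char)[0]? = some a0 := rfl
    have p1 : ([a0,a1,a2,a3,a4,a5,a6,a7,a8,a9,a10,a11,a12] : List Char)[1]? = some a1 := rfl
    have p3 : ([a0,a1,a2,a3,a4,a5,a6,a7,a8,a9,a10,a11,a12] : List Char)[3]? = some a3 := rfl
    have p4 : ([a0,a1,a2,a3,a4,a5,a6,a7,a8,a9,a10,a11,a12] : List Char)[4]? = some a4 := rfl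
    have p6 : ([a0,a1,a2,a3,a4,a5,a6,a7,a8,a9,a10,a11,a12] : List Char)[6]? = some a6 := rfl
    have p9 : ([a0,a1,a2,a3,a4,a5,a6,a7,a8,a9,a10,a11,a12] : List Char)[9]? = some a9 := rfl
    have p10 : ([a0,a1,a2,a3,a4,a5,a6,a7,a8,a9,a10,a11,a12] : List Char)[10]? = some a10 := rfl
    have p12 : ([a0,a1,a2,a3,a4,a5,a6,a7,a8,a9,a10,a11,a12] : List Char)[12]? = some a12 := rfl
    rw [pvHit_eq, g0, g1, g3, g4, g6, g9, g10, g12, p0, p1, p3, p4, p6, p9, p10, p12]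
    rw [Bool.eq_iff_iff]
    simp only [List.length_cons, List.length_nil, beq_iff_eq, Option.some.injEq,
      Bool.and_eq_true, true_and]
    constructor <;> intro hh <;> simp_all

theorem pvHit_stable (p : List Char) (ch : Char) (i : Nat) (hi : i + 13 ≤ p.length) :
    pvHit ((p ++ [ch]).drop i) = pvHit (p.drop i) := by
  have hj : ∀ j : Nat, j < 13 → ((p ++ [ch]).drop i)[j]? = (p.drop i)[j]? := by
    intro j hjlt
    rw [List.getElem?_drop, List.getElem?_drop, List.getElem?_append_left (by omega)]
  simp only [pvHit_eq, hj 0 (by omega), hj 1 (by omega), hj 3 (by omega), hj 4 (by omega),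
    hj 6 (by omega), hj 9 (by omega), hj 10 (by omega), hj 12 (by omega)]

theorem pvB_inv (M : List Char) :
    M.foldl (fun (st : List Char × Int) ch =>
      let w := PySem.List.slice (st.1 ++ [ch]) (some (-13)) none
      if (w.length == 13)
         && (PySem.List.pyGet? w 0 == PySem.List.pyGet? w 1)
         && (PySem.List.pyGet? w 1 == PySem.List.pyGet? w 3)
         && (PySem.List.pyGet? w 3 == PySem.List.pyGet? w 4)
         && (PySem.List.pyGet? w 4 == PySem.List.pyGet? w 9)
         && (PySem.List.pyGet? w 9 == PySem.List.pyGet? w 10)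
         && (PySem.List.pyGet? w 10 == PySem.List.pyGet? w 12)
         && (PySem.List.pyGet? w 12 == some 'c')
         && (PySem.List.pyGet? w 6 == some 't')
      then (w, st.2 + 1) else (w, st.2)) ([], 0)
    = (M.drop (M.length - 13), pvHits M (M.length - 12)) := by
  induction M using List.reverseRecOn with
  | nil => simp [pvHits]
  | append_singleton p ch ih =>
    rw [List.foldl_append, ih, List.foldl_cons, List.foldl_nil]
    simp only [PySem.List.slice_from_neg_ofNat _ 13 (by omega), pvWin]
    have hlen : (p ++ [ch]).length = p.length + 1 := by simp
    rcases Nat.lt_or_ge p.length 12 with h | h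
    · have hlw : ((p ++ [ch]).drop (p.length + 1 - 13)).length ≠ 13 := by
        simp [List.length_drop]; omega
      have hfalse : (((p ++ [ch]).drop (p.length + 1 - 13)).length == 13) = false := by
        exact beq_eq_false_iff_ne.mpr hlw
      rw [hfalse]
      simp only [Bool.false_and]
      have hb1 : p.length - 12 = 0 := by omega
      have hb2 : (p ++ [ch]).length - 12 = 0 := by simp; omega
      rw [hb1, hb2, hlen]
      simp [pvHits]
    · have hwl : ((p ++ [ch]).drop (p.length + 1 - 13)).length = 13 := by
        simp [List.length_drop]; omega
      rw [pvChain13 _ hwl, hlen]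
      have hsplit : pvHits (p ++ [ch]) (p.length + 1 - 12)
          = pvHits p (p.length - 12)
            + (if pvHit ((p ++ [ch]).drop (p.length - 12)) then 1 else 0) := by
        have hb : p.length + 1 - 12 = (p.length - 12) + 1 := by omega
        rw [pvHits, hb, List.range_succ, List.countP_append]
        have hpref : (List.range (p.length - 12)).countP (fun i => pvHit ((p ++ [ch]).drop i))
            = (List.range (p.length - 12)).countP (fun i => pvHit (p.drop i)) := by
          apply List.countP_congr
          intro i hi
          simp only [List.mem_range] at hi
          simp [pvHit_stable p ch i (by omega)]
        rw [hpref]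
        by_cases hp : pvHit ((p ++ [ch]).drop (p.length - 12)) = true <;>
          simp [pvHits, hp]
      have hidx : p.length + 1 - 13 = p.length - 12 := by omega
      rw [hidx, hsplit]
      by_cases hp : pvHit ((p ++ [ch]).drop (p.length - 12)) = true <;> simp [hp]

theorem pvB_eq (line : String) :
    count_line_alt line = pvHits (PySem.Str.lower line).toList ((PySem.Str.lower line).toList.length - 12) := by
  simp only [count_line_alt]
  rw [pvB_inv]

-- ===== VERDICT (by name: the statement is the Claim_ definition above) =====
theorem count_line_spec : Claim_unchanged_count_line := by
  intro line _ hD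
  rw [pvA_eq, pvB_eq]
  rcases Nat.lt_or_ge (PySem.Str.lower line).toList.length 13 with h | h
  · have h1 : (PySem.Str.lower line).toList.length - 13 = 0 := by omega
    have h2 : (PySem.Str.lower line).toList.length - 12 = 0 := by omega
    rw [h1, h2]
  · rw [pvHits_last _ h]
    have hno : ¬ (pvHit ((PySem.Str.lower line).toList.drop ((PySem.Str.lower line).toList.length - 13)) = true) := by
      intro hhit; exact hD ⟨h, hhit⟩
    rw [if_neg hno]; ring

set_option maxRecDepth 4000 in
theorem count_line_changed : Claim_changed_count_line := by
  unfold Claim_changed_count_line; decide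

theorem count_line_tight : Claim_exact_count_line := by
  intro line _ hD
  rw [pvA_eq, pvB_eq, pvHits_last _ hD.1]
  rw [if_pos hD.2]; omega
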